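-- pv_equiv track=rewrite | github.com/Ratty123/crimson-forge-toolkit | archive_removed/experimental_models/ui/models_tab.py | summarize_obj_text
-- ===== SOURCE A (Python) =====
-- def summarize_obj_text(content: str) -> str:
--     vertices = 0
--     texcoords = 0
--     normals = 0
--     faces = 0
--     for raw_line in content.splitlines():
--         line = raw_line.lstrip()
--         if line.startswith("v "):
--             vertices += 1
--         elif line.startswith("vt "):
--             texcoords += 1
--         elif line.startswith("vn "):
--             normals += 1
--         elif line.startswith("f "):
--             faces += 1
--     return f"OBJ summary: {vertices:,} vertices, {texcoords:,} UVs, {normals:,} normals, {faces:,} faces."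
-- ===== SOURCE B (Python) =====
-- def summarize_obj_text(content: str) -> str:
--     lines = [raw.lstrip() for raw in content.splitlines()]
--     vertices = sum(1 for l in lines if l.startswith("v "))
--     texcoords = sum(1 for l in lines if l.startswith("vt "))
--     normals = sum(1 for l in lines if l.startswith("vn "))
--     faces = sum(1 for l in lines if l.startswith("f "))
--     return f"OBJ summary: {vertices:,} vertices, {texcoords:,} UVs, {normals:,} normals, {faces:,} faces."
-- ===== Notes on version B (the rewrite author's own statement) =====
-- stated objective: simpler
-- what changed: Replaces the single interleaved if/elif counting loop over four accumulators by materializing the stripped lines once and computing each of the four counts as an independent filtering pass (correct because the four prefixes are mutually exclusive).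
import Mathlib
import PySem

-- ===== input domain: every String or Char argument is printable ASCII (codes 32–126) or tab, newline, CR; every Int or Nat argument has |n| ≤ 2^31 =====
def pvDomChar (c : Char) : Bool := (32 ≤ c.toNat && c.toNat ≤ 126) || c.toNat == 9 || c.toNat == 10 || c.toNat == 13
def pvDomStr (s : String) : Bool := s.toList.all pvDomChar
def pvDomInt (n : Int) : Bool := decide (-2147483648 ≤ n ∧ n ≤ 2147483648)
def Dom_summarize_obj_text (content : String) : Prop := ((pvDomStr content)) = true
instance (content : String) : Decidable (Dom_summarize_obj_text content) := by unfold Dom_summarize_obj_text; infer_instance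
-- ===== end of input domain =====

-- B replaces A's single interleaved if/elif counting loop by one map of stripped lines and
-- four independent filtering counts (objective: simpler; valid since the prefixes are mutually exclusive).

-- shared helper: Python's '{n:,}' thousands-separator formatting (both sources use the same f-string)
def pvGroupRev : List Char → List Char
  | a :: b :: c :: d :: rest => a :: b :: c :: ',' :: pvGroupRev (d :: rest)
  | l => l

def pvCommaFmt (n : Int) : String := String.ofList ((pvGroupRev (PySem.Int.toStr n).toList.reverse).reverse)

-- ===== PORT A =====
def summarize_obj_text (content : String) : String :=
  let st := (PySem.Str.splitlines content).foldl
    (fun (acc : Int × Int × Int × Int) raw_line =>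
      let line := PySem.Str.lstrip raw_line
      if PySem.Str.startswith line "v " then (acc.1 + 1, acc.2.1, acc.2.2.1, acc.2.2.2)
      else if PySem.Str.startswith line "vt " then (acc.1, acc.2.1 + 1, acc.2.2.1, acc.2.2.2)
      else if PySem.Str.startswith line "vn " then (acc.1, acc.2.1, acc.2.2.1 + 1, acc.2.2.2)
      else if PySem.Str.startswith line "f " then (acc.1, acc.2.1, acc.2.2.1, acc.2.2.2 + 1)
      else acc) (0, 0, 0, 0)
  "OBJ summary: " ++ pvCommaFmt st.1 ++ " vertices, " ++ pvCommaFmt st.2.1 ++ " UVs, " ++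
    pvCommaFmt st.2.2.1 ++ " normals, " ++ pvCommaFmt st.2.2.2 ++ " faces."

-- ===== PORT B =====
def summarize_obj_text_alt (content : String) : String :=
  let lines := (PySem.Str.splitlines content).map PySem.Str.lstrip
  let vertices : Int := (lines.countP (fun l => PySem.Str.startswith l "v ") : Int)
  let texcoords : Int := (lines.countP (fun l => PySem.Str.startswith l "vt ") : Int)
  let normals : Int := (lines.countP (fun l => PySem.Str.startswith l "vn ") : Int)
  let faces : Int := (lines.countP (fun l => PySem.Str.startswith l "f ") : Int)
  "OBJ summary: " ++ pvCommaFmt vertices ++ " vertices, " ++ pvCommaFmt texcoords ++ " UVs, " ++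
    pvCommaFmt normals ++ " normals, " ++ pvCommaFmt faces ++ " faces."

-- ===== PRECONDITION & SPEC =====
def Spec_summarize_obj_text (content : String) (out : String) : Prop := out = summarize_obj_text_alt content
instance (content : String) (out : String) : Decidable (Spec_summarize_obj_text content out) := by unfold Spec_summarize_obj_text; infer_instance

-- ===== CLAIM (what is proved, stated in full; the proofs are below) =====
def Claim_equal_summarize_obj_text : Prop := ∀ (content : String), Dom_summarize_obj_text content → Spec_summarize_obj_text content (summarize_obj_text content)

-- ===== LEMMAS AND PROOFS =====

-- two incomparable prefixes cannot both be prefixes of the same string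
theorem sw_excl (l p q : String) (hp : ¬ p.toList <+: q.toList) (hq : ¬ q.toList <+: p.toList)
    (h : PySem.Str.startswith l q = true) : PySem.Str.startswith l p = false := by
  cases hb : PySem.Str.startswith l p with
  | false => rfl
  | true =>
    exfalso
    simp only [PySem.Str.startswith_eq, PySem.Chars.startswith_iff] at h hb
    exact (List.prefix_or_prefix_of_prefix hb h).elim hp hq

theorem loopA (ls : List String) (a b c d : Int) :
    ls.foldl
      (fun (acc : Int × Int × Int × Int) raw_line =>
        let line := PySem.Str.lstrip raw_line
        if PySem.Str.startswith line "v " then (acc.1 + 1, acc.2.1, acc.2.2.1, acc.2.2.2)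
        else if PySem.Str.startswith line "vt " then (acc.1, acc.2.1 + 1, acc.2.2.1, acc.2.2.2)
        else if PySem.Str.startswith line "vn " then (acc.1, acc.2.1, acc.2.2.1 + 1, acc.2.2.2)
        else if PySem.Str.startswith line "f " then (acc.1, acc.2.1, acc.2.2.1, acc.2.2.2 + 1)
        else acc) (a, b, c, d)
    = (a + ((ls.map PySem.Str.lstrip).countP (fun l => PySem.Str.startswith l "v ") : Int),
       b + ((ls.map PySem.Str.lstrip).countP (fun l => PySem.Str.startswith l "vt ") : Int),
       c + ((ls.map PySem.Str.lstrip).countP (fun l => PySem.Str.startswith l "vn ") : Int),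
       d + ((ls.map PySem.Str.lstrip).countP (fun l => PySem.Str.startswith l "f ") : Int)) := by
  induction ls generalizing a b c d with
  | nil => simp
  | cons x xs ih =>
    simp only [List.foldl_cons, List.map_cons, List.countP_cons]
    by_cases h1 : PySem.Str.startswith (PySem.Str.lstrip x) "v " = true
    · have e2 := sw_excl (PySem.Str.lstrip x) "vt " "v " (by decide) (by decide) h1
      have e3 := sw_excl (PySem.Str.lstrip x) "vn " "v " (by decide) (by decide) h1
      have e4 := sw_excl (PySem.Str.lstrip x) "f " "v " (by decide) (by decide) h1
      rw [if_pos h1, ih]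
      simp only [h1, e2, e3, e4, Bool.false_eq_true, if_true, if_false, Prod.mk.injEq]
      refine ⟨?_, ?_, ?_, ?_⟩ <;> push_cast <;> ring
    · rw [Bool.not_eq_true] at h1
      rw [if_neg (by rw [h1]; exact Bool.false_ne_true)]
      by_cases h2 : PySem.Str.startswith (PySem.Str.lstrip x) "vt " = true
      · have e3 := sw_excl (PySem.Str.lstrip x) "vn " "vt " (by decide) (by decide) h2
        have e4 := sw_excl (PySem.Str.lstrip x) "f " "vt " (by decide) (by decide) h2
        rw [if_pos h2, ih]
        simp only [h1, h2, e3, e4, Bool.false_eq_true, if_true, if_false, Prod.mk.injEq]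
        refine ⟨?_, ?_, ?_, ?_⟩ <;> push_cast <;> ring
      · rw [Bool.not_eq_true] at h2
        rw [if_neg (by rw [h2]; exact Bool.false_ne_true)]
        by_cases h3 : PySem.Str.startswith (PySem.Str.lstrip x) "vn " = true
        · have e4 := sw_excl (PySem.Str.lstrip x) "f " "vn " (by decide) (by decide) h3
          rw [if_pos h3, ih]
          simp only [h1, h2, h3, e4, Bool.false_eq_true, if_true, if_false, Prod.mk.injEq]
          refine ⟨?_, ?_, ?_, ?_⟩ <;> push_cast <;> ring
        · rw [Bool.not_eq_true] at h3
          rw [if_neg (by rw [h3]; exact Bool.false_ne_true)]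
          by_cases h4 : PySem.Str.startswith (PySem.Str.lstrip x) "f " = true
          · rw [if_pos h4, ih]
            simp only [h1, h2, h3, h4, Bool.false_eq_true, if_true, if_false, Prod.mk.injEq]
            refine ⟨?_, ?_, ?_, ?_⟩ <;> push_cast <;> ring
          · rw [Bool.not_eq_true] at h4
            rw [if_neg (by rw [h4]; exact Bool.false_ne_true), ih]
            simp only [h1, h2, h3, h4, Bool.false_eq_true, if_false, Prod.mk.injEq]
            refine ⟨?_, ?_, ?_, ?_⟩ <;> push_cast <;> ring

-- ===== VERDICT (by name: the statement is the Claim_ definition above) =====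
theorem summarize_obj_text_spec : Claim_equal_summarize_obj_text := by
  intro content _
  unfold Spec_summarize_obj_text summarize_obj_text summarize_obj_text_alt
  rw [loopA]
  simp
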